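-- pv_equiv track=rewrite | github.com/MartynasJonkus/liars-dice | runners/evaluate_neural.py | _compute_team_best_places
-- ===== SOURCE A (Python) =====
-- from typing import Any, Dict, List, Tuple
--
-- def _compute_team_best_places(
--     placements_by_seat: Dict[int, int],
--     seat_team_labels: List[str],
-- ) -> Dict[str, int]:
--     per_team_best = {}
--     for seat, place in placements_by_seat.items():
--         team = seat_team_labels[seat]
--         if team not in per_team_best:
--             per_team_best[team] = place
--         else:
--             per_team_best[team] = min(per_team_best[team], place)
--     return per_team_best
-- ===== SOURCE B (Python) =====
-- def _compute_team_best_places(placements_by_seat, seat_team_labels):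
--     groups = {}
--     for seat, place in placements_by_seat.items():
--         groups.setdefault(seat_team_labels[seat], []).append(place)
--     return {team: min(places) for team, places in groups.items()}
-- ===== Notes on version B (the rewrite author's own statement) =====
-- stated objective: alternative
-- what changed: Replaces the fused running-min loop (one dict updated with min on every hit) by a two-phase build-groups-then-reduce structure: first group all placements per team into lists with setdefault/append, then take min of each group in a dict comprehension.
import Mathlib
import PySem

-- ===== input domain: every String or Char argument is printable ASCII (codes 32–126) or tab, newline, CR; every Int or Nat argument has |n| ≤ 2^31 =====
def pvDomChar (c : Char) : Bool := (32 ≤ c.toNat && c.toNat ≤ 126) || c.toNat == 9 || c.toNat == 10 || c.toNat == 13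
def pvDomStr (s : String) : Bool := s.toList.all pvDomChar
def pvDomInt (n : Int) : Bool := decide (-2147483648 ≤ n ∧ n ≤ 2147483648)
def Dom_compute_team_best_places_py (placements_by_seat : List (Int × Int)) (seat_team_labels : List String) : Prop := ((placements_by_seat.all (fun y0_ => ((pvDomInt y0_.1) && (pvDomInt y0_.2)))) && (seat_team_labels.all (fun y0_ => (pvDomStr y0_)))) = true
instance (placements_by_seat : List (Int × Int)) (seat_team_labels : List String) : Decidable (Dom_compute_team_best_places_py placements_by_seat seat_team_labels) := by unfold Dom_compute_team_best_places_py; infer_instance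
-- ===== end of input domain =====

-- B replaces A's fused running-min dict loop by a build-groups-then-reduce decomposition (group placements per team, then min each group); same cost, alternative structure.


-- ===== PORT A =====
-- loop body of A: team = seat_team_labels[seat]; running min update of per_team_best
def pvBodyA (seat_team_labels : List String) (per_team_best : PySem.Dict String Int) (sp : Int × Int) : PySem.Dict String Int :=
  let team := PySem.List.pyGetD seat_team_labels sp.1 ""
  if !per_team_best.contains team then
    per_team_best.insert team sp.2
  else
    per_team_best.insert team (min (per_team_best.getD team 0) sp.2)

def compute_team_best_places_py (placements_by_seat : List (Int × Int)) (seat_team_labels : List String) : List (String × Int) :=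
  (((PySem.Dict.ofList placements_by_seat).items).foldl (pvBodyA seat_team_labels) PySem.Dict.empty).items

-- ===== PORT B =====
-- loop body of B: groups.setdefault(team, []).append(place)  ==  modify team [] (· ++ [place])
def pvBodyB (seat_team_labels : List String) (groups : PySem.Dict String (List Int)) (sp : Int × Int) : PySem.Dict String (List Int) :=
  groups.modify (PySem.List.pyGetD seat_team_labels sp.1 "") [] (fun ps => ps ++ [sp.2])

def compute_team_best_places_py_alt (placements_by_seat : List (Int × Int)) (seat_team_labels : List String) : List (String × Int) :=
  let groups := (((PySem.Dict.ofList placements_by_seat).items).foldl (pvBodyB seat_team_labels) PySem.Dict.empty)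
  groups.items.map (fun p => (p.1, PySem.List.minD p.2 (fun x => x) 0))

-- ===== PRECONDITION & SPEC =====
-- A raises IndexError when some seat key is out of range of seat_team_labels; exactly those inputs are excluded.
def Pre_compute_team_best_places_py (placements_by_seat : List (Int × Int)) (seat_team_labels : List String) : Prop :=
  ∀ p ∈ placements_by_seat, PySem.Raise.InRange seat_team_labels.length p.1
instance (placements_by_seat : List (Int × Int)) (seat_team_labels : List String) : Decidable (Pre_compute_team_best_places_py placements_by_seat seat_team_labels) := by unfold Pre_compute_team_best_places_py; infer_instance

def pvWitness_compute_team_best_places_py : (List (Int × Int)) × List String :=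
  ([(0, 3), (1, 1), (-1, 2)], ["red", "blue"])

def Spec_compute_team_best_places_py (placements_by_seat : List (Int × Int)) (seat_team_labels : List String) (out : List (String × Int)) : Prop := out = compute_team_best_places_py_alt placements_by_seat seat_team_labels
instance (placements_by_seat : List (Int × Int)) (seat_team_labels : List String) (out : List (String × Int)) : Decidable (Spec_compute_team_best_places_py placements_by_seat seat_team_labels out) := by unfold Spec_compute_team_best_places_py; infer_instance

-- ===== CLAIM (what is proved, stated in full; the proofs are below) =====
def Claim_equal_compute_team_best_places_py : Prop := ∀ (placements_by_seat : List (Int × Int)) (seat_team_labels : List String), Dom_compute_team_best_places_py placements_by_seat seat_team_labels → Pre_compute_team_best_places_py placements_by_seat seat_team_labels → Spec_compute_team_best_places_py placements_by_seat seat_team_labels (compute_team_best_places_py placements_by_seat seat_team_labels)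

-- ===== LEMMAS AND PROOFS =====

-- B's per-group reduction, as a function on items entries
def pvReduce : String × List Int → String × Int := fun p => (p.1, PySem.List.minD p.2 (fun x => x) 0)

lemma pvMinStep (ps : List Int) (m : Int) :
    PySem.List.min? (m :: ps) (fun x => x) = some (List.foldl min m ps) := by
  induction ps generalizing m with
  | nil => rfl
  | cons b t ih =>
    have h1 : PySem.List.min? (m :: b :: t) (fun x => x)
        = PySem.List.min? (min m b :: t) (fun x => x) := by
      simp only [PySem.List.min?, List.foldl_cons]
      congr 1
      show (if b < m then some b else some m) = some (min m b)
      split_ifs with hlt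
      · rw [min_eq_right hlt.le]
      · rw [min_eq_left (not_lt.mp hlt)]
    rw [h1, ih (min m b)]
    rfl

lemma pvMinD_cons (a : Int) (ps : List Int) :
    PySem.List.minD (a :: ps) (fun x => x) 0 = List.foldl min a ps := by
  simp only [PySem.List.minD]
  rw [pvMinStep]
  rfl

lemma pvMinD_append (a : Int) (ps : List Int) (y : Int) :
    PySem.List.minD ((a :: ps) ++ [y]) (fun x => x) 0
      = min (PySem.List.minD (a :: ps) (fun x => x) 0) y := by
  rw [List.cons_append, pvMinD_cons, pvMinD_cons, List.foldl_append]
  rfl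

lemma pvContains (g : PySem.Dict String (List Int)) (d : PySem.Dict String Int)
    (h : d.items = g.items.map pvReduce) (k : String) : d.contains k = g.contains k := by
  simp [PySem.Dict.contains, h, List.any_map, Function.comp_def, pvReduce]

lemma pvKeys (g : PySem.Dict String (List Int)) (d : PySem.Dict String Int)
    (h : d.items = g.items.map pvReduce) : d.keys = g.keys := by
  simp [PySem.Dict.keys, h, List.map_map, Function.comp_def, pvReduce]

lemma pvStep (labels : List String) (g : PySem.Dict String (List Int)) (d : PySem.Dict String Int)
    (sp : Int × Int) (hnd : g.keys.Nodup) (hne : ∀ p ∈ g.items, p.2 ≠ [])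
    (h : d.items = g.items.map pvReduce) :
    (pvBodyA labels d sp).items = (pvBodyB labels g sp).items.map pvReduce := by
  set team := PySem.List.pyGetD labels sp.1 "" with hteam
  have hc := pvContains g d h team
  by_cases hg : g.contains team = true
  · -- team already present
    obtain ⟨ps, hmem⟩ : ∃ ps, (team, ps) ∈ g.items := by
      simp only [PySem.Dict.contains, List.any_eq_true, beq_iff_eq] at hg
      obtain ⟨p, hp, hpk⟩ := hg
      refine ⟨p.2, ?_⟩
      rw [← hpk]
      simpa using hp
    have hgv : g.getD team [] = ps := PySem.Dict.getD_of_mem_items g hmem hnd []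
    have hpsne : ps ≠ [] := hne _ hmem
    obtain ⟨a, t, rfl⟩ := List.exists_cons_of_ne_nil hpsne
    have hdmem : (team, PySem.List.minD (a :: t) (fun x => x) 0) ∈ d.items := by
      rw [h]; exact List.mem_map_of_mem hmem
    have hdnd : d.keys.Nodup := by rw [pvKeys g d h]; exact hnd
    have hdv : d.getD team 0 = PySem.List.minD (a :: t) (fun x => x) 0 :=
      PySem.Dict.getD_of_mem_items d hdmem hdnd 0
    have hd : d.contains team = true := by rw [hc]; exact hg
    simp only [pvBodyA, pvBodyB, ← hteam, hd, Bool.not_true, Bool.false_eq_true, if_false]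
    rw [PySem.Dict.modify, PySem.Dict.items_insert_of_contains g _ hg,
        PySem.Dict.items_insert_of_contains d _ hd, h, List.map_map, List.map_map]
    refine List.map_congr_left (fun p hp => ?_)
    by_cases hk : p.1 = team
    · have hpv : p.2 = a :: t := by
        have := PySem.Dict.getD_of_mem_items g (show (team, p.2) ∈ g.items by
          rw [← hk]; exact hp) hnd []
        rw [hgv] at this; exact this.symm
      simp [pvReduce, hk, hdv, hgv, hpv]
      rw [show a :: (t ++ [sp.2]) = (a :: t) ++ [sp.2] from rfl, pvMinD_append]
    · simp [pvReduce, hk]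
  · -- new team
    have hg' : g.contains team = false := by simpa using hg
    have hd : d.contains team = false := by rw [hc]; exact hg'
    simp only [pvBodyA, pvBodyB, ← hteam, hd, Bool.not_false, if_true]
    rw [PySem.Dict.modify, PySem.Dict.getD_of_not_contains g [] hg',
        PySem.Dict.items_insert_of_not_contains g _ hg',
        PySem.Dict.items_insert_of_not_contains d _ hd, h, List.map_append]
    rfl

lemma pvLoop (labels : List String) (l : List (Int × Int)) :
    ∀ (g : PySem.Dict String (List Int)) (d : PySem.Dict String Int),
      g.keys.Nodup → (∀ p ∈ g.items, p.2 ≠ []) → d.items = g.items.map pvReduce →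
      (l.foldl (pvBodyA labels) d).items = (l.foldl (pvBodyB labels) g).items.map pvReduce := by
  induction l with
  | nil => intro g d _ _ h; simpa using h
  | cons sp t ih =>
    intro g d hnd hne h
    simp only [List.foldl_cons]
    refine ih _ _ ?_ ?_ (pvStep labels g d sp hnd hne h)
    · have := PySem.Dict.nodup_keys_foldl_modify_key [sp]
        (fun sp => PySem.List.pyGetD labels sp.1 "") []
        (fun _ sp ps => ps ++ [sp.2]) g hnd
      simpa [pvBodyB] using this
    · intro p hp
      have : p = (PySem.List.pyGetD labels sp.1 "", g.getD (PySem.List.pyGetD labels sp.1 "") [] ++ [sp.2])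
          ∨ (p ∈ g.items ∧ p.1 ≠ PySem.List.pyGetD labels sp.1 "") := by
        have := (PySem.Dict.mem_items_insert (d := g)
          (k := PySem.List.pyGetD labels sp.1 "")
          (v := g.getD (PySem.List.pyGetD labels sp.1 "") [] ++ [sp.2]) (p := p)).mp
          (by simpa [pvBodyB, PySem.Dict.modify] using hp)
        exact this
      rcases this with rfl | ⟨hmem, _⟩
      · simp
      · exact hne p hmem

-- ===== VERDICT (by name: the statement is the Claim_ definition above) =====
theorem compute_team_best_places_py_spec : Claim_equal_compute_team_best_places_py := by
  intro placements labels _ _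
  unfold Spec_compute_team_best_places_py compute_team_best_places_py compute_team_best_places_py_alt
  exact pvLoop labels ((PySem.Dict.ofList placements).items) PySem.Dict.empty PySem.Dict.empty
    (by simp [PySem.Dict.keys, PySem.Dict.empty]) (by simp [PySem.Dict.empty])
    (by simp [PySem.Dict.empty])
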